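-- pv_equiv track=rewrite | github.com/JinxiLiu2026/YouTube-Analytics-Intelligence-Platform | backend/app/frontend_payload.py | _keyword_tokens
-- ===== SOURCE A (Python) =====
-- def _keyword_tokens(text: str) -> set[str]:
--     tokens = []
--     current = []
--     for char in str(text).lower():
--         if char.isalnum():
--             current.append(char)
--         else:
--             if current:
--                 tokens.append("".join(current))
--                 current = []
--     if current:
--         tokens.append("".join(current))
--     return {token for token in tokens if len(token) >= 4}
-- ===== SOURCE B (Python) =====
-- def _keyword_tokens(text: str) -> set[str]:
--     cleaned = "".join(c if c.isalnum() else " " for c in str(text).lower())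
--     return {t for t in cleaned.split() if len(t) >= 4}
-- ===== Notes on version B (the rewrite author's own statement) =====
-- stated objective: simpler
-- what changed: The hand-written buffer state machine that flushes runs of alphanumeric characters is replaced by mapping every non-alphanumeric character to a space and letting str.split() do the run grouping, followed by a set comprehension over tokens of length >= 4.
import Mathlib
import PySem

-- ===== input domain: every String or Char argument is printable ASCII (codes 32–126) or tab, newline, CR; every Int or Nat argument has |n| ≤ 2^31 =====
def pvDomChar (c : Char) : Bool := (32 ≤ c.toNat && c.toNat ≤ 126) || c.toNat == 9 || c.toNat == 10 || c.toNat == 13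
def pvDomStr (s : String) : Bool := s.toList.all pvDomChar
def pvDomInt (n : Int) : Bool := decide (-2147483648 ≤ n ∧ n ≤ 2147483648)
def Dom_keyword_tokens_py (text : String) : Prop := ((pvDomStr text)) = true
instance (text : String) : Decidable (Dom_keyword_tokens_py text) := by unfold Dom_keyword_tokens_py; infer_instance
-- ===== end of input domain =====

-- B replaces A's hand-written buffer state machine by "map non-alphanumerics to spaces, then str.split()" (simpler decomposition, same cost).

-- ===== PORT A =====
-- state machine: (tokens so far, current buffer); flush the buffer on every non-alnum char
def keyword_tokens_py (text : String) : List String :=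
  let st := ((PySem.Str.lower text).toList).foldl
    (fun (s : List String × List Char) c =>
      if PySem.Chars.isalnum c then (s.1, s.2 ++ [c])
      else if s.2.isEmpty then s
      else (s.1 ++ [String.ofList s.2], []))
    ([], [])
  let tokens := if st.2.isEmpty then st.1 else st.1 ++ [String.ofList st.2]
  PySem.Set.ofList (tokens.filter (fun t => 4 ≤ PySem.Str.len t))

-- ===== PORT B =====
def keyword_tokens_py_alt (text : String) : List String :=
  let cleaned := String.ofList (((PySem.Str.lower text).toList).map
    (fun c => if PySem.Chars.isalnum c then c else ' '))
  PySem.Set.ofList ((PySem.Str.split₀ cleaned).filter (fun t => 4 ≤ PySem.Str.len t))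

-- ===== PRECONDITION & SPEC =====
def Spec_keyword_tokens_py (text : String) (out : List String) : Prop := out = keyword_tokens_py_alt text
instance (text : String) (out : List String) : Decidable (Spec_keyword_tokens_py text out) := by unfold Spec_keyword_tokens_py; infer_instance

-- ===== CLAIM (what is proved, stated in full; the proofs are below) =====
def Claim_equal_keyword_tokens_py : Prop := ∀ (text : String), Dom_keyword_tokens_py text → Spec_keyword_tokens_py text (keyword_tokens_py text)

-- ===== LEMMAS AND PROOFS =====

-- the cleaning map of B
def pvClean (c : Char) : Char := if PySem.Chars.isalnum c then c else ' '

-- A's loop step, on List Char tokens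
def pvStepL (s : List (List Char) × List Char) (c : Char) : List (List Char) × List Char :=
  if PySem.Chars.isalnum c then (s.1, s.2 ++ [c])
  else if s.2.isEmpty then s
  else (s.1 ++ [s.2], [])

lemma isalnum_not_isspace (c : Char) (h : PySem.Chars.isalnum c = true) :
    PySem.Chars.isspace c = false := by
  simp only [PySem.Chars.isalnum, PySem.Chars.isalpha, PySem.Chars.isupper,
    PySem.Chars.islower, PySem.Chars.isdigit, Bool.or_eq_true, Bool.and_eq_true,
    decide_eq_true_eq] at h
  simp only [PySem.Chars.isspace, Bool.or_eq_false_iff, Bool.and_eq_false_iff,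
    decide_eq_false_iff_not]
  have l1 : c.val.toNat = c.toNat := rfl
  have hA : ('A' : Char).val.toNat = 65 := rfl
  have hZ : ('Z' : Char).val.toNat = 90 := rfl
  have ha : ('a' : Char).val.toNat = 97 := rfl
  have hz : ('z' : Char).val.toNat = 122 := rfl
  have h0 : ('0' : Char).val.toNat = 48 := rfl
  have h9 : ('9' : Char).val.toNat = 57 := rfl
  rcases h with (⟨h1, h2⟩ | ⟨h1, h2⟩) | ⟨h1, h2⟩ <;>
    · rw [Char.le_def, UInt32.le_iff_toNat_le] at h1
      rw [Char.le_def, UInt32.le_iff_toNat_le] at h2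
      omega

lemma go_eq (cs : List Char) : ∀ (toks : List (List Char)) (cur : List Char),
    PySem.Chars.split₀.go (cs.map pvClean) cur.reverse toks.reverse =
      (let st := cs.foldl pvStepL (toks, cur)
       if st.2.isEmpty then st.1 else st.1 ++ [st.2]) := by
  induction cs with
  | nil =>
    intro toks cur
    simp only [List.map_nil, PySem.Chars.split₀.go, List.foldl_nil]
    by_cases h : cur.isEmpty <;>
      simp [h]
  | cons c rest ih =>
    intro toks cur
    simp only [List.map_cons, List.foldl_cons]
    by_cases h : PySem.Chars.isalnum c
    · have hns : PySem.Chars.isspace c = false := isalnum_not_isspace c h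
      simp only [pvClean, pvStepL, h, if_pos]
      rw [show (PySem.Chars.split₀.go (c :: rest.map pvClean) cur.reverse toks.reverse)
            = PySem.Chars.split₀.go (rest.map pvClean) (c :: cur.reverse) toks.reverse by
          simp [PySem.Chars.split₀.go, hns]]
      rw [show c :: cur.reverse = (cur ++ [c]).reverse by simp]
      exact ih toks (cur ++ [c])
    · have hsp : PySem.Chars.isspace ' ' = true := by decide
      simp only [pvClean, pvStepL, h, if_false, Bool.false_eq_true]
      by_cases hc : cur.isEmpty
      · have : cur = [] := List.isEmpty_iff.mp hc
        subst this
        simpa [PySem.Chars.split₀.go, hsp, hc] using ih toks []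
      · have : cur.reverse.isEmpty = false := by
          simp_all [List.isEmpty_iff]
        rw [show (PySem.Chars.split₀.go (' ' :: rest.map pvClean) cur.reverse toks.reverse)
              = PySem.Chars.split₀.go (rest.map pvClean) [] (cur.reverse.reverse :: toks.reverse) by
            simp [PySem.Chars.split₀.go, hsp, this]]
        have hrw : cur.reverse.reverse :: toks.reverse = (toks ++ [cur]).reverse := by simp
        rw [hrw, show ([] : List Char) = ([] : List Char).reverse from rfl]
        simpa [hc] using ih (toks ++ [cur]) []

-- A's String-token fold is the List-Char-token fold, mapped through String.ofList
lemma fold_map (cs : List Char) : ∀ (toks : List (List Char)) (cur : List Char),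
    cs.foldl
      (fun (s : List String × List Char) c =>
        if PySem.Chars.isalnum c then (s.1, s.2 ++ [c])
        else if s.2.isEmpty then s
        else (s.1 ++ [String.ofList s.2], []))
      (toks.map String.ofList, cur)
    = ((cs.foldl pvStepL (toks, cur)).1.map String.ofList, (cs.foldl pvStepL (toks, cur)).2) := by
  induction cs with
  | nil => intro toks cur; simp
  | cons c rest ih =>
    intro toks cur
    simp only [List.foldl_cons, pvStepL]
    by_cases h : PySem.Chars.isalnum c
    · simpa [h] using ih toks (cur ++ [c])
    · by_cases hc : cur.isEmpty
      · simpa [h, hc] using ih toks cur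
      · have := ih (toks ++ [cur]) []
        simpa [h, hc] using this

-- ===== VERDICT (by name: the statement is the Claim_ definition above) =====
theorem keyword_tokens_py_spec : Claim_equal_keyword_tokens_py := by
  intro text _
  unfold Spec_keyword_tokens_py keyword_tokens_py keyword_tokens_py_alt
  dsimp only
  set cs := (PySem.Str.lower text).toList with hcs
  have hgo := go_eq cs [] []
  have hfold := fold_map cs [] []
  simp only [List.reverse_nil, List.map_nil] at hgo hfold
  have hmap : cs.map (fun c => if PySem.Chars.isalnum c then c else ' ') = cs.map pvClean := rfl
  rw [show (PySem.Str.split₀ (String.ofList (cs.map (fun c => if PySem.Chars.isalnum c then c else ' ')))) =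
        (PySem.Chars.split₀ (cs.map (fun c => if PySem.Chars.isalnum c then c else ' '))).map String.ofList by
      simp [PySem.Str.split₀]]
  rw [hmap]
  rw [show PySem.Chars.split₀ (cs.map pvClean) = PySem.Chars.split₀.go (cs.map pvClean) [] [] from rfl]
  rw [hgo, hfold]
  set st := cs.foldl pvStepL ([], []) with hst
  by_cases h : st.2.isEmpty
  · simp only [h, if_true]
  · simp only [h, if_false, Bool.false_eq_true, List.map_append, List.map_cons, List.map_nil]
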